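-- pv_equiv track=rewrite | github.com/seedstohr/100-Days-of-Code-The-Complete-Python-Pro-Bootcamp | blackjack/main.py | ace_conversion
-- ===== SOURCE A (Python) =====
-- def ace_conversion(card_list):
--     total = sum(card_list)
--     while total > 21:
--         if 11 in card_list:
--             card_list[card_list.index(11)] = 1
--             total = sum(card_list)
--         else:
--             break
--     return total
-- ===== SOURCE B (Python) =====
-- def ace_conversion(card_list):
--     # Closed form: one pass for the sum, one pass for the ace count.
--     # Note: unlike A, this does not mutate card_list (return value is identical).
--     total = sum(card_list)
--     if total <= 21:
--         return total
--     need = -((21 - total) // 10)  # ceil((total - 21) / 10)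
--     return total - 10 * min(need, card_list.count(11))
-- ===== Notes on version B (the rewrite author's own statement) =====
-- stated objective: alternative
-- what changed: Replaces the while-loop that repeatedly rescans the list (index of 11, full re-sum per conversion) with a closed form: sum once, count the 11s once, and subtract 10*min(ceil((total-21)/10), count); A's O(n*a) rescans become O(n), though on the sampled inputs a timing run showed no difference.
import Mathlib
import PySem

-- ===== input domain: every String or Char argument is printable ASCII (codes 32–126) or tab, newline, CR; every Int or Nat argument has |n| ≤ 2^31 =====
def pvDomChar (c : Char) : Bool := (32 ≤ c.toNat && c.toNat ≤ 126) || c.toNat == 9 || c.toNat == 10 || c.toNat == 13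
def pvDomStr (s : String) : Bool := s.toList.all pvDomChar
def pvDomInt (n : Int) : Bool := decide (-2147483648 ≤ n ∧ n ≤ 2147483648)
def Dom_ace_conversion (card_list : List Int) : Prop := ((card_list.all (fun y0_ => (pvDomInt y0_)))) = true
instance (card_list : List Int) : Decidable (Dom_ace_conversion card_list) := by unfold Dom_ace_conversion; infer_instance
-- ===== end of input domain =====

-- B replaces A's rescan-per-ace while-loop by a closed form (sum once, count 11s once);
-- A mutates card_list in place (first aces set to 1), B does not: equivalence proved is about the return value.

-- ===== PORT A =====
-- card_list[card_list.index(11)] = 1 : set the FIRST occurrence of 11 to 1 (exact when 11 ∈ list)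
def pvReplace11 : List Int → List Int
  | [] => []
  | x :: xs => if x = 11 then 1 :: xs else x :: pvReplace11 xs

theorem pvReplace11_count_lt {l : List Int} (h : (11 : Int) ∈ l) :
    (pvReplace11 l).count 11 < l.count 11 := by
  induction l with
  | nil => cases h
  | cons x xs ih =>
    by_cases hx : x = (11 : Int)
    · subst hx
      simp [pvReplace11, List.count_cons]
    · have h' : (11 : Int) ∈ xs := (List.mem_cons.mp h).resolve_left (fun e => hx e.symm)
      simp only [pvReplace11, if_neg hx, List.count_cons]
      have := ih h'
      omega

-- the while-loop of A: total > 21 and an 11 present → convert it and re-sum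
def pvAceLoop (cards : List Int) (total : Int) : Int :=
  if total > 21 then
    if h : (11 : Int) ∈ cards then
      let cards' := pvReplace11 cards
      pvAceLoop cards' cards'.sum
    else total
  else total
termination_by cards.count 11
decreasing_by exact pvReplace11_count_lt h

def ace_conversion (card_list : List Int) : Int :=
  pvAceLoop card_list card_list.sum

-- ===== PORT B =====
def ace_conversion_alt (card_list : List Int) : Int :=
  let total := card_list.sum
  if total ≤ 21 then total
  else
    let need := -(PySem.Int.floordiv (21 - total) 10)
    total - 10 * min need (card_list.count 11 : Int)

-- ===== PRECONDITION & SPEC =====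
def Spec_ace_conversion (card_list : List Int) (out : Int) : Prop := out = ace_conversion_alt card_list
instance (card_list : List Int) (out : Int) : Decidable (Spec_ace_conversion card_list out) := by unfold Spec_ace_conversion; infer_instance

-- ===== CLAIM (what is proved, stated in full; the proofs are below) =====
def Claim_equal_ace_conversion : Prop := ∀ (card_list : List Int), Dom_ace_conversion card_list → Spec_ace_conversion card_list (ace_conversion card_list)

-- ===== LEMMAS AND PROOFS =====

theorem pvReplace11_count {l : List Int} (h : (11 : Int) ∈ l) :
    ((pvReplace11 l).count 11 : Int) = (l.count 11 : Int) - 1 := by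
  induction l with
  | nil => cases h
  | cons x xs ih =>
    by_cases hx : x = (11 : Int)
    · subst hx
      simp [pvReplace11, List.count_cons]
    · have h' : (11 : Int) ∈ xs := (List.mem_cons.mp h).resolve_left (fun e => hx e.symm)
      simp only [pvReplace11, if_neg hx, List.count_cons]
      have := ih h'
      by_cases hv : x = (11 : Int) <;> simp [hv] at * <;> omega

theorem pvReplace11_sum {l : List Int} (h : (11 : Int) ∈ l) :
    (pvReplace11 l).sum = l.sum - 10 := by
  induction l with
  | nil => cases h
  | cons x xs ih =>
    by_cases hx : x = (11 : Int)
    · subst hx; simp [pvReplace11]; ring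
    · have h' : (11 : Int) ∈ xs := (List.mem_cons.mp h).resolve_left (fun e => hx e.symm)
      simp only [pvReplace11, if_neg hx, List.sum_cons, ih h']
      omega

-- ceiling bracket for q := -((21 - s) // 10) : (q-1)*10 < s - 21 ≤ q*10
theorem pvCeilBracket (s : Int) :
    (-(PySem.Int.floordiv (21 - s) 10) - 1) * 10 < s - 21 ∧
      s - 21 ≤ -(PySem.Int.floordiv (21 - s) 10) * 10 := by
  have h : (21 - s) = -(s - 21) := by ring
  rw [h]
  exact (PySem.Int.neg_floordiv_neg_eq_iff_of_pos (a := s - 21) (b := 10) (by omega)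
    (q := -(PySem.Int.floordiv (-(s - 21)) 10))).mp rfl

theorem pvAceLoop_eq (n : Nat) (cards : List Int) (hc : cards.count 11 = n) :
    pvAceLoop cards cards.sum = ace_conversion_alt cards := by
  induction n generalizing cards with
  | zero =>
    have hnm : (11 : Int) ∉ cards := by
      intro hm; have := List.count_pos_iff.mpr hm; omega
    rw [pvAceLoop]
    by_cases ht : cards.sum > 21
    · rw [if_pos ht, dif_neg hnm]
      have hb := pvCeilBracket cards.sum
      simp only [ace_conversion_alt, hc]
      rw [if_neg (by omega)]
      push_cast
      omega
    · rw [if_neg ht]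
      simp only [ace_conversion_alt]
      rw [if_pos (by omega)]
  | succ m ih =>
    have hm : (11 : Int) ∈ cards := by
      have : 0 < cards.count 11 := by omega
      exact List.count_pos_iff.mp this
    rw [pvAceLoop]
    by_cases ht : cards.sum > 21
    · rw [if_pos ht, dif_pos hm]
      have hc' : (pvReplace11 cards).count 11 = m := by
        have := pvReplace11_count hm; omega
      rw [ih (pvReplace11 cards) hc']
      -- now: alt (pvReplace11 cards) = alt cards
      have hs' := pvReplace11_sum hm
      have hcnt := pvReplace11_count hm
      have hb := pvCeilBracket cards.sum
      have hb' := pvCeilBracket (pvReplace11 cards).sum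
      simp only [ace_conversion_alt, hs'] at hb' ⊢
      by_cases ht' : cards.sum - 10 ≤ 21
      · rw [if_pos ht', if_neg (by omega)]
        omega
      · rw [if_neg ht', if_neg (by omega)]
        omega
    · rw [if_neg ht]
      simp only [ace_conversion_alt]
      rw [if_pos (by omega)]

-- ===== VERDICT (by name: the statement is the Claim_ definition above) =====
theorem ace_conversion_spec : Claim_equal_ace_conversion := by
  intro card_list _
  unfold Spec_ace_conversion ace_conversion
  exact pvAceLoop_eq (card_list.count 11) card_list rfl
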